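-- pv_equiv track=rewrite | github.com/ljpenn9/LeetCode75 | VowelSwap/Solution.py | rFindVowel
-- ===== SOURCE A (Python) =====
-- def rFindVowel(s: str) -> int:
--     vowels = "AaEeIiOoUu"
--     index = -1
--     for letter in vowels:
--         newIndex = s.rfind(letter)
--         if (newIndex > index):
--             index = newIndex
--     return index
-- ===== SOURCE B (Python) =====
-- def rFindVowel(s: str) -> int:
--     vowels = set("AaEeIiOoUu")
--     for i in range(len(s) - 1, -1, -1):
--         if s[i] in vowels:
--             return i
--     return -1
-- ===== Notes on version B (the rewrite author's own statement) =====
-- stated objective: simpler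
-- what changed: Instead of ten full rfind scans (one per vowel) whose maximum is the answer, B does a single reverse scan over the string positions, returning the first index (from the right) whose character is a vowel, -1 if none.
import Mathlib
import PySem

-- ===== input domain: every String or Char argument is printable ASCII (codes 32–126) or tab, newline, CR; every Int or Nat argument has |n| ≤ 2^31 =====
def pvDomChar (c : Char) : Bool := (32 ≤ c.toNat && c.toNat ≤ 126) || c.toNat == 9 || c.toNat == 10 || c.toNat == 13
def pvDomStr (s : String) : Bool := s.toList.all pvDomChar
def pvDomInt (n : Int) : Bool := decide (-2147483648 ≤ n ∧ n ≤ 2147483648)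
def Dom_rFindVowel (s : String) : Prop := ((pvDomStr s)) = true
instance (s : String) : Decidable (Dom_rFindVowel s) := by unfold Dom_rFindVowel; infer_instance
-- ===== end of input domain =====

-- B replaces A's ten full rfind scans (one per vowel, keeping the maximum) by a single
-- reverse scan over the string's positions, returning the first vowel index from the right.


-- ===== PORT A =====
-- for letter in "AaEeIiOoUu": index := max-by-'>' of s.rfind(letter), starting at -1
def rFindVowel (s : String) : Int :=
  "AaEeIiOoUu".toList.foldl
    (fun index letter =>
      let newIndex := PySem.Str.rfind s (String.ofList [letter])
      if newIndex > index then newIndex else index)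
    (-1)

-- ===== PORT B =====
-- scan i = len(s)-1 .. 0, return the first i with s[i] in the vowel set, else -1
def rFindVowelAltGo (vowels : PySem.Set Char) (cs : List Char) (i : Int) : Int :=
  match cs with
  | [] => -1
  | c :: rest => if PySem.Set.contains vowels c then i else rFindVowelAltGo vowels rest (i - 1)

def rFindVowel_alt (s : String) : Int :=
  rFindVowelAltGo (PySem.Set.ofList "AaEeIiOoUu".toList) s.toList.reverse ((s.length : Int) - 1)

-- ===== PRECONDITION & SPEC =====
def Spec_rFindVowel (s : String) (out : Int) : Prop := out = rFindVowel_alt s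
instance (s : String) (out : Int) : Decidable (Spec_rFindVowel s out) := by unfold Spec_rFindVowel; infer_instance

-- ===== CLAIM (what is proved, stated in full; the proofs are below) =====
def Claim_equal_rFindVowel : Prop := ∀ (s : String), Dom_rFindVowel s → Spec_rFindVowel s (rFindVowel s)

-- ===== LEMMAS AND PROOFS =====

def pvVowels : List Char := ['A', 'a', 'E', 'e', 'I', 'i', 'O', 'o', 'U', 'u']

theorem pvVowels_eq : "AaEeIiOoUu".toList = pvVowels := by decide

theorem pvVowels_ofList : PySem.Set.ofList pvVowels = pvVowels := by decide

-- the fold of A, abstracted over the character list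
def gFold (L : List Char) (init : Int) (V : List Char) : Int :=
  V.foldl
    (fun index letter =>
      let newIndex := PySem.Chars.rfind L [letter]
      if newIndex > index then newIndex else index)
    init

theorem go_zero (L sub : List Char) :
    PySem.Chars.rfind.go L sub 0 = if sub.isPrefixOf L then 0 else -1 := rfl

theorem go_succ (L sub : List Char) (j : Nat) :
    PySem.Chars.rfind.go L sub (j + 1) =
      if sub.isPrefixOf (L.drop (j + 1)) then ((j : Int) + 1) else PySem.Chars.rfind.go L sub j := by
  simp [PySem.Chars.rfind.go]

theorem singleton_prefix (c x : Char) (t : List Char) :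
    [c].isPrefixOf (x :: t) = (c == x) := by
  simp [List.isPrefixOf]

theorem prefix_drop_append (M : List Char) (a c : Char) (j : Nat) (hj : j < M.length) :
    [c].isPrefixOf ((M ++ [a]).drop j) = [c].isPrefixOf (M.drop j) := by
  obtain ⟨x, t, hx⟩ : ∃ x t, M.drop j = x :: t := by
    cases h : M.drop j with
    | nil =>
      rw [List.drop_eq_nil_iff] at h
      omega
    | cons x t => exact ⟨x, t, rfl⟩
  rw [List.drop_append_of_le_length (by omega), hx, List.cons_append,
    singleton_prefix, singleton_prefix]

theorem go_append (M : List Char) (a c : Char) :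
    ∀ i, i < M.length →
      PySem.Chars.rfind.go (M ++ [a]) [c] i = PySem.Chars.rfind.go M [c] i := by
  intro i
  induction i with
  | zero =>
    intro h
    rw [go_zero, go_zero]
    rcases M with _ | ⟨x, t⟩
    · simp at h
    · simp [singleton_prefix]
  | succ j ih =>
    intro h
    rw [go_succ, go_succ, prefix_drop_append M a c (j + 1) h, ih (by omega)]

theorem rfind_nil (c : Char) : PySem.Chars.rfind [] [c] = -1 := rfl

theorem rfind_append (M : List Char) (a c : Char) :
    PySem.Chars.rfind (M ++ [a]) [c] =
      if a = c then (M.length : Int) else PySem.Chars.rfind M [c] := by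
  show PySem.Chars.rfind.go (M ++ [a]) [c] (M ++ [a]).length = _
  have hlen : (M ++ [a]).length = M.length + 1 := by simp
  rw [hlen, go_succ, List.drop_eq_nil_of_le (by simp)]
  simp only [List.isPrefixOf, Bool.false_eq_true, if_false]
  cases M with
  | nil =>
    rw [List.length_nil, List.nil_append, go_zero, singleton_prefix, rfind_nil]
    by_cases h : a = c
    · simp [h]
    · have hc : (c == a) = false := beq_eq_false_iff_ne.mpr (fun e => h e.symm)
      simp [hc, h]
  | cons x t =>
    rw [List.length_cons, go_succ]
    have hdrop : ((x :: t) ++ [a]).drop (t.length + 1) = [a] := by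
      rw [List.drop_append_of_le_length (by simp), List.drop_eq_nil_of_le (by simp)]
      rfl
    rw [hdrop, singleton_prefix]
    by_cases h : a = c
    · rw [beq_iff_eq.mpr h.symm]
      simp [h]
    · have hc : (c == a) = false := beq_eq_false_iff_ne.mpr (fun e => h e.symm)
      rw [hc]
      simp only [Bool.false_eq_true, if_false, if_neg h]
      rw [go_append (x :: t) a c t.length (by simp)]
      show _ = PySem.Chars.rfind.go (x :: t) [c] (x :: t).length
      rw [List.length_cons, go_succ, List.drop_eq_nil_of_le (by simp)]
      simp [List.isPrefixOf]

theorem rfind_le (L : List Char) (c : Char) :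
    PySem.Chars.rfind L [c] ≤ (L.length : Int) - 1 := by
  induction L using List.reverseRecOn with
  | nil => rw [rfind_nil]; simp
  | append_singleton M a ih =>
    rw [rfind_append]
    by_cases h : a = c <;> simp [h] <;> omega

theorem gFold_const (L : List Char) (init : Int) (V : List Char)
    (h : (L.length : Int) - 1 ≤ init) : gFold L init V = init := by
  induction V generalizing init with
  | nil => rfl
  | cons c rest ih =>
    show gFold L (if PySem.Chars.rfind L [c] > init then _ else init) rest = init
    rw [if_neg (by have := rfind_le L c; omega)]
    exact ih init h

theorem gFold_append_notmem (M : List Char) (a : Char) (init : Int) (V : List Char)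
    (h : a ∉ V) : gFold (M ++ [a]) init V = gFold M init V := by
  induction V generalizing init with
  | nil => rfl
  | cons c rest ih =>
    have hac : a ≠ c := fun e => h (e ▸ List.mem_cons_self)
    show gFold (M ++ [a]) (if PySem.Chars.rfind (M ++ [a]) [c] > init then _ else init) rest = _
    rw [rfind_append, if_neg hac]
    exact ih _ (fun hm => h (List.mem_cons_of_mem c hm))

theorem gFold_append_mem (M : List Char) (a : Char) (init : Int) (V : List Char)
    (hmem : a ∈ V) (hinit : init ≤ (M.length : Int)) :
    gFold (M ++ [a]) init V = (M.length : Int) := by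
  induction V generalizing init with
  | nil => simp at hmem
  | cons c rest ih =>
    show gFold (M ++ [a]) (if PySem.Chars.rfind (M ++ [a]) [c] > init then _ else init) rest = _
    by_cases hac : a = c
    · rw [rfind_append, if_pos hac]
      have hacc : (if (M.length : Int) > init then (M.length : Int) else init) = (M.length : Int) := by
        by_cases h : (M.length : Int) > init <;> simp [h] <;> omega
      rw [hacc]
      exact gFold_const _ _ _ (by simp)
    · have hrest : a ∈ rest := by rcases List.mem_cons.mp hmem with e | hm; exact absurd e hac; exact hm
      have hb := rfind_le (M ++ [a]) c
      simp only [List.length_append, List.length_cons, List.length_nil] at hb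
      by_cases h : PySem.Chars.rfind (M ++ [a]) [c] > init
      · rw [if_pos h]; exact ih _ hrest (by push_cast at hb ⊢; omega)
      · rw [if_neg h]; exact ih _ hrest hinit

theorem main_eq (L : List Char) :
    gFold L (-1) pvVowels =
      rFindVowelAltGo pvVowels L.reverse ((L.length : Int) - 1) := by
  induction L using List.reverseRecOn with
  | nil => decide
  | append_singleton M a ih =>
    have hrev : (M ++ [a]).reverse = a :: M.reverse := by simp
    have hlen : ((M ++ [a]).length : Int) - 1 = (M.length : Int) := by simp
    rw [hrev, hlen]
    show gFold (M ++ [a]) (-1) pvVowels =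
      if PySem.Set.contains pvVowels a then (M.length : Int)
      else rFindVowelAltGo pvVowels M.reverse ((M.length : Int) - 1)
    by_cases h : a ∈ pvVowels
    · rw [gFold_append_mem M a (-1) pvVowels h (by omega),
        if_pos (by simpa [PySem.Set.contains] using h)]
    · rw [gFold_append_notmem M a (-1) pvVowels h,
        if_neg (by simpa [PySem.Set.contains] using h), ih]

-- ===== VERDICT (by name: the statement is the Claim_ definition above) =====
theorem rFindVowel_spec : Claim_equal_rFindVowel := by
  intro s _
  show rFindVowel s = rFindVowel_alt s
  unfold rFindVowel rFindVowel_alt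
  rw [pvVowels_eq, pvVowels_ofList]
  show gFold s.toList (-1) pvVowels =
    rFindVowelAltGo pvVowels s.toList.reverse ((s.toList.length : Int) - 1)
  exact main_eq s.toList
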